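-- pv_equiv track=rewrite | github.com/robert-godlewski/python_algo | algo/solutions/hashmap_solutions.py | _letterSort
-- ===== SOURCE A (Python) =====
-- def _letterSort(word: str) -> str:
--     letters = list(word)
--     letter_position = {
--         "a": {"index": 0, "count": 0},
--         "b": {"index": 1, "count": 0},
--         "c": {"index": 2, "count": 0},
--         "d": {"index": 3, "count": 0},
--         "e": {"index": 4, "count": 0},
--         "f": {"index": 5, "count": 0},
--         "g": {"index": 6, "count": 0},
--         "h": {"index": 7, "count": 0},
--         "i": {"index": 8, "count": 0},
--         "j": {"index": 9, "count": 0},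
--         "k": {"index": 10, "count": 0},
--         "l": {"index": 11, "count": 0},
--         "m": {"index": 12, "count": 0},
--         "n": {"index": 13, "count": 0},
--         "o": {"index": 14, "count": 0},
--         "p": {"index": 15, "count": 0},
--         "q": {"index": 16, "count": 0},
--         "r": {"index": 17, "count": 0},
--         "s": {"index": 18, "count": 0},
--         "t": {"index": 19, "count": 0},
--         "u": {"index": 20, "count": 0},
--         "v": {"index": 21, "count": 0},
--         "w": {"index": 22, "count": 0},
--         "x": {"index": 23, "count": 0},
--         "y": {"index": 24, "count": 0},
--         "z": {"index": 25, "count": 0}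
--     }
--     for letter in letters:
--         if letter in letter_position:
--             letter_position[letter]["count"] += 1
--     answer = ""
--     for key in letter_position.keys():
--         count = letter_position[key]["count"]
--         while count > 0:
--             answer += key
--             count -= 1
--     return answer
-- ===== SOURCE B (Python) =====
-- def _letterSort(word: str) -> str:
--     return "".join(sorted(c for c in word if "a" <= c <= "z"))
-- ===== Notes on version B (the rewrite author's own statement) =====
-- stated objective: idiomatic
-- what changed: Replaces the 26-entry count dictionary plus while-loop string concatenation with a one-liner that filters the ASCII lowercase letters and joins their comparison-sorted list.
import Mathlib
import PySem

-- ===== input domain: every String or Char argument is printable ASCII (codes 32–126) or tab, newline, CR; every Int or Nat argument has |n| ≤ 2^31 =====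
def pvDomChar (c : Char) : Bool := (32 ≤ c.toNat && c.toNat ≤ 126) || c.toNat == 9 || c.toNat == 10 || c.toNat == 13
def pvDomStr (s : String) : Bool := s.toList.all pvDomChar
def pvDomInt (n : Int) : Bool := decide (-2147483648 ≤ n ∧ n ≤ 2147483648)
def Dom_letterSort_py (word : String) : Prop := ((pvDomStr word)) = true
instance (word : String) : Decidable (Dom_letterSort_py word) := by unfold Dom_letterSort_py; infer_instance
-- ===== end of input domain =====

-- B replaces A's 26-entry count dictionary and while-loop string building by
-- filter + comparison sort + join (idiomatic; no speed claim).

-- ===== PORT A =====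
-- the inner Python dicts {"index": i, "count": c} have the fixed shape of a
-- record; each is ported as the pair (index, count)
def pvLetterPosition : PySem.Dict Char (Int × Int) :=
  PySem.Dict.ofList
    [('a',(0,0)),('b',(1,0)),('c',(2,0)),('d',(3,0)),('e',(4,0)),('f',(5,0)),
     ('g',(6,0)),('h',(7,0)),('i',(8,0)),('j',(9,0)),('k',(10,0)),('l',(11,0)),
     ('m',(12,0)),('n',(13,0)),('o',(14,0)),('p',(15,0)),('q',(16,0)),('r',(17,0)),
     ('s',(18,0)),('t',(19,0)),('u',(20,0)),('v',(21,0)),('w',(22,0)),('x',(23,0)),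
     ('y',(24,0)),('z',(25,0))]

-- the 'while count > 0: answer += key; count -= 1' loop
def pvWhileRep (key : Char) (count : Int) : List Char :=
  if h : count > 0 then key :: pvWhileRep key (count - 1) else []
termination_by count.toNat
decreasing_by omega

def letterSort_py (word : String) : String :=
  let letters := word.toList
  let letterPosition :=
    letters.foldl
      (fun d letter =>
        if d.contains letter then d.modify letter (0,0) (fun p => (p.1, p.2 + 1)) else d)
      pvLetterPosition
  let answer :=
    letterPosition.keys.foldl
      (fun acc key =>
        let count := (letterPosition.getD key (0,0)).2
        acc ++ pvWhileRep key count)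
      ([] : List Char)
  String.mk answer

-- ===== PORT B =====
def letterSort_py_alt (word : String) : String :=
  String.mk (PySem.List.sorted
    (word.toList.filter (fun c => decide ('a' ≤ c ∧ c ≤ 'z'))) (fun c => c))

-- ===== PRECONDITION & SPEC =====
def Spec_letterSort_py (word : String) (out : String) : Prop := out = letterSort_py_alt word
instance (word : String) (out : String) : Decidable (Spec_letterSort_py word out) := by unfold Spec_letterSort_py; infer_instance

-- ===== CLAIM (what is proved, stated in full; the proofs are below) =====
def Claim_equal_letterSort_py : Prop := ∀ (word : String), Dom_letterSort_py word → Spec_letterSort_py word (letterSort_py word)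

-- ===== LEMMAS AND PROOFS =====

def pvAlphabet : List Char :=
  ['a','b','c','d','e','f','g','h','i','j','k','l','m',
   'n','o','p','q','r','s','t','u','v','w','x','y','z']

theorem pvMem_alphabet_iff (c : Char) : c ∈ pvAlphabet ↔ ('a' ≤ c ∧ c ≤ 'z') := by
  constructor
  · intro h
    fin_cases h <;> decide
  · rintro ⟨h1, h2⟩
    have h1' : 97 ≤ c.toNat := h1
    have h2' : c.toNat ≤ 122 := h2
    rw [← Char.ofNat_toNat c]
    interval_cases h : c.toNat <;> decide

-- the body of A's counting loop
def pvStep (d : PySem.Dict Char (Int × Int)) (letter : Char) : PySem.Dict Char (Int × Int) :=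
  if d.contains letter then d.modify letter (0,0) (fun p => (p.1, p.2 + 1)) else d

theorem pvStep_keys (d : PySem.Dict Char (Int × Int)) (x : Char) : (pvStep d x).keys = d.keys := by
  unfold pvStep
  split
  · rename_i h
    rw [PySem.Dict.keys_modify, PySem.Dict.keys_insert_of_contains _ _ h]
  · rfl

theorem pvStep_contains (d : PySem.Dict Char (Int × Int)) (x k : Char) :
    (pvStep d x).contains k = d.contains k := by
  unfold pvStep
  split
  · rename_i h
    rw [PySem.Dict.contains_modify]
    cases hk : (k == x)
    · simp
    · simp at hk; simp [hk, h]
  · rfl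

theorem pvLoop_keys (L : List Char) (d : PySem.Dict Char (Int × Int)) :
    (L.foldl pvStep d).keys = d.keys := by
  induction L generalizing d with
  | nil => rfl
  | cons x xs ih => simp [List.foldl_cons, ih, pvStep_keys]

theorem pvLoop_getD (L : List Char) (d : PySem.Dict Char (Int × Int)) (k : Char)
    (hk : d.contains k = true) :
    (L.foldl pvStep d).getD k (0,0) =
      ((d.getD k (0,0)).1, (d.getD k (0,0)).2 + (L.count k : Int)) := by
  induction L generalizing d with
  | nil => simp
  | cons x xs ih =>
    rw [List.foldl_cons, ih _ ((pvStep_contains d x k).trans hk)]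
    unfold pvStep
    by_cases hx : d.contains x = true
    · rw [if_pos hx, PySem.Dict.getD_modify]
      by_cases hkx : k = x
      · subst hkx
        simp
        omega
      · rw [if_neg hkx, List.count_cons_of_ne (Ne.symm hkx)]
    · rw [if_neg hx]
      have hkx : ¬ (k = x) := fun e => hx (e ▸ hk)
      rw [List.count_cons_of_ne (Ne.symm hkx)]

theorem pvWhileRep_eq_replicate (key : Char) (n : Nat) :
    pvWhileRep key (n : Int) = List.replicate n key := by
  induction n with
  | zero => rw [pvWhileRep]; simp
  | succ m ih =>
    rw [pvWhileRep, dif_pos (by omega)]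
    have h1 : ((m + 1 : Nat) : Int) - 1 = (m : Int) := by push_cast; omega
    rw [List.replicate_succ, h1, ih]

-- A's result as a canonical flatMap of replicates
theorem pvA_eq_canonical (word : String) :
    letterSort_py word =
      String.mk (pvAlphabet.flatMap (fun k => List.replicate (word.toList.count k) k)) := by
  unfold letterSort_py
  have hstep : (fun (d : PySem.Dict Char (Int × Int)) letter =>
      if d.contains letter then d.modify letter (0,0) (fun p => (p.1, p.2 + 1)) else d) = pvStep := rfl
  simp only [hstep]
  have hkeys : ((word.toList.foldl pvStep pvLetterPosition)).keys = pvAlphabet := by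
    rw [pvLoop_keys]; decide
  rw [hkeys,
    PySem.List.foldl_append_eq_flatMap
      (g := fun key => pvWhileRep key (((word.toList.foldl pvStep pvLetterPosition).getD key (0,0)).2))]
  simp only [List.nil_append]
  congr 1
  apply List.flatMap_congr
  intro k hk
  have hcont : pvLetterPosition.contains k = true := by fin_cases hk <;> decide
  have hzero : (pvLetterPosition.getD k (0,0)).2 = 0 := by fin_cases hk <;> decide
  rw [pvLoop_getD _ _ _ hcont]
  simp only [hzero, zero_add]
  exact pvWhileRep_eq_replicate k _

-- general counting-sort shape lemmas for B
theorem pvCount_flatMap_replicate (ks : List Char) (n : Char → Nat) (hnd : ks.Nodup) (x : Char) :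
    (ks.flatMap (fun k => List.replicate (n k) k)).count x = if x ∈ ks then n x else 0 := by
  induction ks with
  | nil => simp
  | cons k t ih =>
    simp only [List.flatMap_cons, List.count_append, List.count_replicate,
      List.nodup_cons] at *
    rw [ih hnd.2]
    by_cases hx : k = x
    · subst hx
      simp [hnd.1]
    · have hbx : (k == x) = false := by simp [hx]
      have hxk : ¬ (x = k) := fun e => hx e.symm
      simp [hbx, hxk]

theorem pvPairwise_flatMap_replicate (ks : List Char) (n : Char → Nat)
    (h : ks.Pairwise (· < ·)) :
    (ks.flatMap (fun k => List.replicate (n k) k)).Pairwise (· ≤ ·) := by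
  induction ks with
  | nil => simp
  | cons k t ih =>
    simp only [List.flatMap_cons]
    rw [List.pairwise_append]
    rcases List.pairwise_cons.mp h with ⟨hk, ht⟩
    refine ⟨List.pairwise_replicate.mpr (Or.inr le_rfl), ih ht, ?_⟩
    intro a ha b hb
    rw [List.eq_of_mem_replicate ha]
    rcases List.mem_flatMap.mp hb with ⟨c, hc, hbc⟩
    rw [List.eq_of_mem_replicate hbc]
    exact le_of_lt (hk c hc)

theorem pvB_eq_canonical (word : String) :
    letterSort_py_alt word =
      String.mk (pvAlphabet.flatMap (fun k => List.replicate (word.toList.count k) k)) := by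
  unfold letterSort_py_alt
  congr 1
  apply PySem.List.sorted_id_eq_of_perm_of_pairwise
  · apply List.perm_iff_count.mpr
    intro x
    rw [pvCount_flatMap_replicate _ _ (by decide) x]
    by_cases hx : ('a' ≤ x ∧ x ≤ 'z')
    · rw [if_pos ((pvMem_alphabet_iff x).mpr hx)]
      rw [List.count_filter (by simpa using hx)]
    · rw [if_neg (fun h => hx ((pvMem_alphabet_iff x).mp h))]
      symm
      rw [List.count_eq_zero]
      intro hmem
      exact hx (by simpa using (List.mem_filter.mp hmem).2)
  · exact pvPairwise_flatMap_replicate _ _ (by decide)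

-- ===== VERDICT (by name: the statement is the Claim_ definition above) =====
theorem letterSort_py_spec : Claim_equal_letterSort_py := by
  intro word _
  unfold Spec_letterSort_py
  rw [pvA_eq_canonical, pvB_eq_canonical]
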